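-- pv_equiv track=rewrite | github.com/infrablue1/my-algorithm | leet-code/algorithm/arrays/max_submatrix.py | getMaxMatrix
-- ===== SOURCE A (Python) =====
-- def getMaxMatrix(matrix: list[list[int]]) -> list[int]:
--     m, n = len(matrix), len((matrix[0]))
--     preSum = [[0 for _ in range(n)] for _ in range(m)]
--     for i in range(m):
--         for j in range(n):
--             if i == 0:
--                 preSum[i][j] = matrix[i][j]
--             else:
--                 preSum[i][j] = matrix[i][j] + preSum[i - 1][j]
--
--     r1, r2 = 0, 0
--     maxValue = preSum[0][0]
--     ans = [0, 0, 0, 0]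
--     for startRow in range(m):
--         for endRow in range(startRow, m):
--             total = 0
--             c1, c2 = 0, 0
--             for col in range(n):
--                 val = preSum[endRow][col] - preSum[startRow - 1][col] \
--                     if startRow > 0 else preSum[endRow][col]
--                 if total < 0:
--                     c1 = col
--                     total = 0
--                 total += val
--                 if total > maxValue:
--                     maxValue = total
--                     r1, r2 = startRow, endRow
--                     c2 = col
--                     ans = [r1, c1, r2, c2]
--     return ans
-- ===== SOURCE B (Python) =====
-- def getMaxMatrix(matrix: list[list[int]]) -> list[int]:
--     m, n = len(matrix), len(matrix[0])
--     maxValue = matrix[0][0]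
--     ans = [0, 0, 0, 0]
--     for startRow in range(m):
--         sums = [0] * n
--         for endRow in range(startRow, m):
--             row = matrix[endRow]
--             for col in range(n):
--                 sums[col] += row[col]
--             total, c1 = 0, 0
--             for col in range(n):
--                 if total < 0:
--                     c1, total = col, 0
--                 total += sums[col]
--                 if total > maxValue:
--                     maxValue = total
--                     ans = [startRow, c1, endRow, col]
--     return ans
-- ===== Notes on version B (the rewrite author's own statement) =====
-- stated objective: alternative
-- what changed: B drops A's precomputed 2D prefix-sum table and instead accumulates an O(n) per-startRow column-sum array incrementally inside the endRow loop, running the same Kadane scan over it.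
import Mathlib
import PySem

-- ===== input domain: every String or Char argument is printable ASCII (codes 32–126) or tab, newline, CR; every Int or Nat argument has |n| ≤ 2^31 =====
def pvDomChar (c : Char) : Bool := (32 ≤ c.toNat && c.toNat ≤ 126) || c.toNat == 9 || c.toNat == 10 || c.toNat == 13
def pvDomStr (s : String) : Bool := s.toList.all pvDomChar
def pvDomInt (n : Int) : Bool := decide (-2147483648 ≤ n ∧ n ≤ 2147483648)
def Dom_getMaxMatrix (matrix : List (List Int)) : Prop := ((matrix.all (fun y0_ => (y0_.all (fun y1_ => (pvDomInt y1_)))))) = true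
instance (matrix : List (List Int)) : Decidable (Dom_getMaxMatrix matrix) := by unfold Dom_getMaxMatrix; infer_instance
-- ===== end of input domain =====

-- B drops A's 2D prefix-sum table and instead accumulates per-startRow column sums
-- incrementally inside the endRow loop, running the same Kadane scan; objective: alternative.

-- ===== PORT A =====
-- preSum row construction: row i of A's preSum table (prev = none means i == 0)
def pvPreRow (row : List Int) (prev : Option (List Int)) (n : Nat) : List Int :=
  (List.range n).map (fun j =>
    match prev with
    | none => row.getD j 0
    | some p => row.getD j 0 + p.getD j 0)

def pvMkPreSum : List (List Int) → Option (List Int) → Nat → List (List Int)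
  | [], _, _ => []
  | r :: rs, prev, n =>
    let pr := pvPreRow r prev n
    pr :: pvMkPreSum rs (some pr) n

-- the ternary computing `val` in A's inner loop
def pvValA (preSum : List (List Int)) (startRow endRow col : Nat) : Int :=
  if startRow > 0 then
    ((preSum.getD endRow []).getD col 0) - ((preSum.getD (startRow - 1) []).getD col 0)
  else
    (preSum.getD endRow []).getD col 0

-- one iteration of A's inner `for col` loop; state = (total, c1, maxValue, ans)
def pvStepA (preSum : List (List Int)) (startRow endRow : Nat)
    (s : Int × Nat × Int × List Int) (col : Nat) : Int × Nat × Int × List Int :=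
  let val := pvValA preSum startRow endRow col
  let c1 := if s.1 < 0 then col else s.2.1
  let total := (if s.1 < 0 then 0 else s.1) + val
  if total > s.2.2.1 then (total, c1, total, [(startRow : Int), (c1 : Int), (endRow : Int), (col : Int)])
  else (total, c1, s.2.2.1, s.2.2.2)

-- body of A's `for endRow` loop: runs the inner `for col` loop and keeps (maxValue, ans)
def pvInnerA (preSum : List (List Int)) (n startRow : Nat)
    (st : Int × List Int) (endRow : Nat) : Int × List Int :=
  let r := (List.range n).foldl (pvStepA preSum startRow endRow) (0, 0, st.1, st.2)
  (r.2.2.1, r.2.2.2)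

def getMaxMatrix (matrix : List (List Int)) : List Int :=
  let m := matrix.length
  let n := (matrix.headD []).length
  let preSum := pvMkPreSum matrix none n
  let init : Int × List Int := ((preSum.headD []).getD 0 0, [0, 0, 0, 0])
  ((List.range m).foldl (fun st startRow =>
      (List.range' startRow (m - startRow)).foldl (pvInnerA preSum n startRow) st) init).2

-- ===== PORT B =====
-- B's inner Kadane scan over the accumulated column sums
def pvKadane (startRow endRow : Nat) :
    List Int → Nat → Int → Nat → Int → List Int → Int × List Int
  | [], _, _, _, mv, ans => (mv, ans)
  | v :: rest, col, total, c1, mv, ans =>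
    let c1' := if total < 0 then col else c1
    let total' := (if total < 0 then 0 else total) + v
    if total' > mv then
      pvKadane startRow endRow rest (col + 1) total' c1' total'
        [(startRow : Int), (c1' : Int), (endRow : Int), (col : Int)]
    else
      pvKadane startRow endRow rest (col + 1) total' c1' mv ans

-- body of B's `for endRow` loop: add the row into sums, then Kadane; acc = (sums, maxValue, ans)
def pvStepB (matrix : List (List Int)) (startRow : Nat)
    (acc : List Int × Int × List Int) (endRow : Nat) : List Int × Int × List Int :=
  let sums := List.zipWith (· + ·) acc.1 (matrix.getD endRow [])
  let r := pvKadane startRow endRow sums 0 0 0 acc.2.1 acc.2.2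
  (sums, r.1, r.2)

def getMaxMatrix_alt (matrix : List (List Int)) : List Int :=
  let m := matrix.length
  let n := (matrix.headD []).length
  let init : Int × List Int := ((matrix.headD []).getD 0 0, [0, 0, 0, 0])
  ((List.range m).foldl (fun st startRow =>
      ((List.range' startRow (m - startRow)).foldl (pvStepB matrix startRow)
        (List.replicate n 0, st.1, st.2)).2) init).2

-- ===== PRECONDITION & SPEC =====
-- Pre_ excludes exactly the inputs where Python A raises IndexError: an empty matrix,
-- an empty first row, or some row shorter than the first row.
def Pre_getMaxMatrix (matrix : List (List Int)) : Prop :=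
  matrix ≠ [] ∧ (matrix.headD []) ≠ [] ∧
    ∀ row ∈ matrix, (matrix.headD []).length ≤ row.length
instance (matrix : List (List Int)) : Decidable (Pre_getMaxMatrix matrix) := by
  unfold Pre_getMaxMatrix; infer_instance

def pvWitness_getMaxMatrix : List (List Int) := [[1, -2], [3, 4]]

def Spec_getMaxMatrix (matrix : List (List Int)) (out : List Int) : Prop := out = getMaxMatrix_alt matrix
instance (matrix : List (List Int)) (out : List Int) : Decidable (Spec_getMaxMatrix matrix out) := by unfold Spec_getMaxMatrix; infer_instance

-- ===== CLAIM (what is proved, stated in full; the proofs are below) =====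
def Claim_equal_getMaxMatrix : Prop := ∀ (matrix : List (List Int)), Dom_getMaxMatrix matrix → Pre_getMaxMatrix matrix → Spec_getMaxMatrix matrix (getMaxMatrix matrix)

-- ===== LEMMAS AND PROOFS =====

-- column sum of a list of rows (each row contributing entry j, default 0)
def colPre (rows : List (List Int)) (j : Nat) : Int :=
  (rows.map (fun r => r.getD j 0)).sum

-- the sums array B maintains after j rows of the strip starting at s have been added
def sumsFor (matrix : List (List Int)) (n s j : Nat) : List Int :=
  (List.range n).map (fun c => colPre ((matrix.drop s).take j) c)

lemma foldl_congr_mem' {α β : Type} (l : List β) (g1 g2 : α → β → α) (s : α)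
    (h : ∀ c ∈ l, ∀ a, g1 a c = g2 a c) : l.foldl g1 s = l.foldl g2 s := by
  induction l generalizing s with
  | nil => rfl
  | cons x xs ih =>
    simp only [List.foldl_cons]
    rw [h x (by simp)]
    exact ih _ (fun c hc a => h c (by simp [hc]) a)

lemma getD_map_range {f : Nat → Int} {n j : Nat} (h : j < n) :
    ((List.range n).map f).getD j 0 = f j := by
  rw [List.getD_eq_getElem _ _ (by simpa using h)]
  simp

lemma preRow_getD (row : List Int) (prev : Option (List Int)) (n j : Nat) (hj : j < n) :
    (pvPreRow row prev n).getD j 0 =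
      (match prev with | none => 0 | some p => p.getD j 0) + row.getD j 0 := by
  cases prev with
  | none =>
    show ((List.range n).map _).getD j 0 = _
    rw [getD_map_range hj]; simp
  | some p =>
    show ((List.range n).map _).getD j 0 = _
    rw [getD_map_range hj]
    show row.getD j 0 + p.getD j 0 = p.getD j 0 + row.getD j 0
    ring

lemma mkPreSum_getD (rows : List (List Int)) (prev : Option (List Int)) (n i j : Nat)
    (hi : i < rows.length) (hj : j < n) :
    ((pvMkPreSum rows prev n).getD i []).getD j 0 =
      (match prev with | none => 0 | some p => p.getD j 0) + colPre (rows.take (i + 1)) j := by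
  induction rows generalizing prev i with
  | nil => simp at hi
  | cons r rs ih =>
    cases i with
    | zero =>
      simp only [pvMkPreSum, List.getD, List.getElem?_cons_zero, Option.getD_some,
        List.take_succ_cons, List.take_zero, colPre, List.map_cons, List.map_nil,
        List.sum_cons, List.sum_nil, add_zero]
      have := preRow_getD r prev n j hj
      simp only [List.getD] at this
      exact this
    | succ i' =>
      have hi' : i' < rs.length := by simpa using hi
      simp only [pvMkPreSum, List.getD, List.getElem?_cons_succ]
      have h2 := ih (some (pvPreRow r prev n)) i' hi'
      simp only [List.getD] at h2
      rw [h2]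
      have hpr := preRow_getD r prev n j hj
      simp only [List.getD] at hpr
      rw [hpr]
      simp only [List.take_succ_cons, colPre, List.map_cons, List.sum_cons, List.getD]
      ring

lemma colPre_take_sub (matrix : List (List Int)) (s k j : Nat) :
    colPre (matrix.take (s + k)) j - colPre (matrix.take s) j =
      colPre ((matrix.drop s).take k) j := by
  have h : matrix.take (s + k) = matrix.take s ++ (matrix.drop s).take k := by
    rw [List.take_add]
  rw [h]; simp [colPre]

-- A's val equals the strip column sum
lemma valA_eq (matrix : List (List Int)) (n s e j : Nat)
    (hse : s ≤ e) (he : e < matrix.length) (hj : j < n) :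
    pvValA (pvMkPreSum matrix none n) s e j = colPre ((matrix.drop s).take (e - s + 1)) j := by
  have hlen : ∀ i, i < matrix.length →
      ((pvMkPreSum matrix none n).getD i []).getD j 0 = colPre (matrix.take (i + 1)) j := by
    intro i hi
    have := mkPreSum_getD matrix none n i j hi hj
    simpa using this
  unfold pvValA
  by_cases hs : s > 0
  · rw [if_pos hs, hlen e he, hlen (s - 1) (lt_of_le_of_lt (by omega) he)]
    have h1 : s - 1 + 1 = s := by omega
    rw [h1]
    have h2 : e + 1 = s + (e - s + 1) := by omega
    rw [h2, colPre_take_sub]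
  · rw [if_neg hs]
    have hs0 : s = 0 := by omega
    subst hs0
    rw [hlen e he]
    simp

lemma sumsFor_length (matrix : List (List Int)) (n s j : Nat) :
    (sumsFor matrix n s j).length = n := by simp [sumsFor]

lemma sumsFor_zero (matrix : List (List Int)) (n s : Nat) :
    sumsFor matrix n s 0 = List.replicate n 0 := by
  simp [sumsFor, colPre, List.map_const']

lemma colPre_singleton (row : List Int) (j : Nat) : colPre [row] j = row.getD j 0 := by
  simp [colPre]

lemma sumsFor_succ (matrix : List (List Int)) (n s j : Nat) (h : s + j < matrix.length)
    (hrow : n ≤ (matrix.getD (s + j) []).length) :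
    List.zipWith (· + ·) (sumsFor matrix n s j) (matrix.getD (s + j) []) = sumsFor matrix n s (j + 1) := by
  apply List.ext_getElem
  · simp only [List.getD] at hrow
    simp [sumsFor, List.getD]; omega
  · intro c h1 h2
    have hc : c < n := by simpa [sumsFor] using h2
    rw [List.getElem_zipWith]
    simp only [sumsFor, List.getElem_map, List.getElem_range]
    have hd : (matrix.drop s)[j]? = some (matrix.getD (s + j) []) := by
      rw [List.getElem?_drop, List.getElem?_eq_getElem h, List.getD_eq_getElem _ _ h]
    have htake : (matrix.drop s).take (j + 1) =
        (matrix.drop s).take j ++ [matrix.getD (s + j) []] := by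
      rw [List.take_add_one, hd]; rfl
    rw [htake]
    have : colPre ((matrix.drop s).take j ++ [matrix.getD (s + j) []]) c =
        colPre ((matrix.drop s).take j) c + colPre [matrix.getD (s + j) []] c := by
      simp [colPre]
    rw [this, colPre_singleton]
    congr 1
    rw [List.getD_eq_getElem _ _ (lt_of_lt_of_le hc hrow)]

-- kadane over sums with sums[c] equal to f c is A's fold, projected
lemma kadane_eq_fold (sR eR : Nat) (preSum : List (List Int)) :
    ∀ (sums : List Int) (col : Nat) (total : Int) (c1 : Nat) (mv : Int) (ans : List Int),
    (∀ i, i < sums.length → sums.getD i 0 = pvValA preSum sR eR (col + i)) →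
    pvKadane sR eR sums col total c1 mv ans =
      (let r := (List.range' col sums.length).foldl (pvStepA preSum sR eR) (total, c1, mv, ans)
       (r.2.2.1, r.2.2.2)) := by
  intro sums
  induction sums with
  | nil => intro col total c1 mv ans _; rfl
  | cons v rest ih =>
    intro col total c1 mv ans h
    have hv : pvValA preSum sR eR col = v := by
      have := h 0 (by simp)
      simpa using this.symm
    have hrest : ∀ i, i < rest.length → rest.getD i 0 = pvValA preSum sR eR (col + 1 + i) := by
      intro i hi
      have := h (i + 1) (by simpa using Nat.succ_lt_succ hi)
      simpa [Nat.add_comm, Nat.add_assoc, Nat.add_left_comm] using this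
    show pvKadane sR eR (v :: rest) col total c1 mv ans = _
    simp only [List.length_cons, List.range'_succ, List.foldl_cons]
    rw [pvKadane]
    simp only [pvStepA, hv]
    by_cases hgt : (if total < 0 then 0 else total) + v > mv
    · rw [if_pos hgt, if_pos hgt, ih (col + 1) _ _ _ _ hrest]
    · rw [if_neg hgt, if_neg hgt, ih (col + 1) _ _ _ _ hrest]

-- the strip-loop invariant: B's endRow fold tracks A's, carrying sumsFor alongside
lemma strip_loop (matrix : List (List Int)) (n : Nat) (hPre : Pre_getMaxMatrix matrix)
    (hn : n = (matrix.headD []).length) :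
    ∀ (k s j : Nat) (st : Int × List Int), s + j + k ≤ matrix.length →
    ((List.range' (s + j) k).foldl (pvStepB matrix s) (sumsFor matrix n s j, st.1, st.2)).2 =
      (List.range' (s + j) k).foldl (pvInnerA (pvMkPreSum matrix none n) n s) st := by
  intro k
  induction k with
  | zero => intro s j st _; rfl
  | succ k ih =>
    intro s j st hle
    have hsj : s + j < matrix.length := by omega
    have hrowlen : n ≤ (matrix.getD (s + j) []).length := by
      have hmem : matrix.getD (s + j) [] ∈ matrix := by
        rw [List.getD_eq_getElem _ _ hsj]; exact List.getElem_mem _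
      rw [hn]; exact hPre.2.2 _ hmem
    rw [List.range'_succ, List.foldl_cons, List.foldl_cons]
    have hstep : pvStepB matrix s (sumsFor matrix n s j, st.1, st.2) (s + j) =
        (sumsFor matrix n s (j + 1),
         (pvInnerA (pvMkPreSum matrix none n) n s st (s + j)).1,
         (pvInnerA (pvMkPreSum matrix none n) n s st (s + j)).2) := by
      show (List.zipWith (· + ·) (sumsFor matrix n s j) (matrix.getD (s + j) []),
            (pvKadane s (s + j) (List.zipWith (· + ·) (sumsFor matrix n s j) (matrix.getD (s + j) [])) 0 0 0 st.1 st.2).1,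
            (pvKadane s (s + j) (List.zipWith (· + ·) (sumsFor matrix n s j) (matrix.getD (s + j) [])) 0 0 0 st.1 st.2).2) = _
      rw [sumsFor_succ matrix n s j hsj hrowlen]
      have hk : pvKadane s (s + j) (sumsFor matrix n s (j + 1)) 0 0 0 st.1 st.2 =
          pvInnerA (pvMkPreSum matrix none n) n s st (s + j) := by
        rw [kadane_eq_fold s (s + j) (pvMkPreSum matrix none n) (sumsFor matrix n s (j + 1)) 0 0 0 st.1 st.2 ?hvals]
        · show _ = pvInnerA _ _ _ _ _
          unfold pvInnerA
          rw [sumsFor_length, List.range_eq_range']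
        case hvals =>
          intro i hi
          have hi' : i < n := by rwa [sumsFor_length] at hi
          rw [show 0 + i = i from by omega]
          rw [valA_eq matrix n s (s + j) i (by omega) hsj hi']
          unfold sumsFor
          rw [getD_map_range hi']
          rw [show s + j - s + 1 = j + 1 from by omega]
      rw [hk]
    rw [hstep]
    exact ih s (j + 1) (pvInnerA (pvMkPreSum matrix none n) n s st (s + j)) (by omega)

lemma init_eq (matrix : List (List Int)) (hne : matrix ≠ [])
    (hn0 : 0 < (matrix.headD []).length) :
    ((pvMkPreSum matrix none ((matrix.headD []).length)).headD []).getD 0 0 =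
      (matrix.headD []).getD 0 0 := by
  cases matrix with
  | nil => exact absurd rfl hne
  | cons r rs =>
    show (pvPreRow r none _).getD 0 0 = _
    have := preRow_getD r none ((r :: rs).headD []).length 0 (by simpa using hn0)
    simpa using this

-- ===== VERDICT (by name: the statement is the Claim_ definition above) =====
theorem getMaxMatrix_spec : Claim_equal_getMaxMatrix := by
  intro matrix _ hPre
  obtain ⟨hne, hrow0, hlen⟩ := hPre
  have hn0 : 0 < (matrix.headD []).length := List.length_pos_of_ne_nil hrow0
  show getMaxMatrix matrix = getMaxMatrix_alt matrix
  show ((List.range matrix.length).foldl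
      (fun st startRow => (List.range' startRow (matrix.length - startRow)).foldl
          (pvInnerA (pvMkPreSum matrix none ((matrix.headD []).length)) ((matrix.headD []).length) startRow) st)
      (((pvMkPreSum matrix none ((matrix.headD []).length)).headD []).getD 0 0, [0, 0, 0, 0])).2
    = ((List.range matrix.length).foldl
      (fun st startRow => ((List.range' startRow (matrix.length - startRow)).foldl (pvStepB matrix startRow)
          (List.replicate ((matrix.headD []).length) 0, st.1, st.2)).2)
      ((matrix.headD []).getD 0 0, [0, 0, 0, 0])).2
  rw [init_eq matrix hne hn0]
  refine congrArg Prod.snd (foldl_congr_mem' _ _ _ _ ?_)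
  intro s hs st
  have hs' : s < matrix.length := by simpa using hs
  have h0 := strip_loop matrix ((matrix.headD []).length) ⟨hne, hrow0, hlen⟩ rfl
    (matrix.length - s) s 0 st (by omega)
  rw [← sumsFor_zero matrix ((matrix.headD []).length) s]
  exact h0.symm
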